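-- pv_equiv track=rewrite | github.com/davidesarra/wordy | wordy/submission.py | _parse_words_by_line
-- ===== SOURCE A (Python) =====
-- from typing import List
--
-- def _parse_words_by_line(solution: List[List[str]]) -> List[str]:
--     words = []
--     word_stack = []
--     for line in solution:
--         for character in line:
--             if character == " ":
--                 if word_stack:
--                     if len(word_stack) > 1:  # we ignore one-character words
--                         word = "".join(word_stack)
--                         words.append(word)
--                     word_stack = []
--             else:
--                 word_stack.append(character)
--         if word_stack:
--             if len(word_stack) > 1:  # we ignore one-character words
--                 word = "".join(word_stack)
--                 words.append(word)
--             word_stack = []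
--     return words
-- ===== SOURCE B (Python) =====
-- from typing import List
--
-- def _parse_words_by_line(solution: List[List[str]]) -> List[str]:
--     # Flatten all lines into one element list with a " " sentinel appended to each
--     # line (a line end flushes exactly like a space), then extract the segments
--     # between spaces by index search and slicing instead of a per-element state machine.
--     flat = [element for line in solution for element in line + [" "]]
--     words = []
--     i, n = 0, len(flat)
--     while i < n:
--         try:
--             j = flat.index(" ", i)
--         except ValueError:
--             j = n
--         if j - i > 1:  # we ignore one-character words
--             words.append("".join(flat[i:j]))
--         i = j + 1
--     return words
-- ===== Notes on version B (the rewrite author's own statement) =====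
-- stated objective: alternative
-- what changed: Instead of A's per-element push/flush word-stack state machine over nested loops, B flattens all lines into one list with a " " sentinel appended to each line (a line end flushes exactly like a space) and extracts words by repeated index-of-space search plus slicing.
import Mathlib
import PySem

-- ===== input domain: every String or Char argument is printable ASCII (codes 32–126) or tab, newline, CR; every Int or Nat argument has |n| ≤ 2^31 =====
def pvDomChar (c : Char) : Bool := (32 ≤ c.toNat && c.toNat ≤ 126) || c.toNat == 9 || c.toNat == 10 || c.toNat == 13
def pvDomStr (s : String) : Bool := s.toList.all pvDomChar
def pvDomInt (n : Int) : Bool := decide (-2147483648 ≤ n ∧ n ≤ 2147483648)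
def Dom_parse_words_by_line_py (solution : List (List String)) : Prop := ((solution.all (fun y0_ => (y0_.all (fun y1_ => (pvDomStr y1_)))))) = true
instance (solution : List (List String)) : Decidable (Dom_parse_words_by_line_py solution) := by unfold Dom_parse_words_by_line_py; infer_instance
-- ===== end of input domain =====

-- B flattens all lines into one list with a " " sentinel after each line (a line end
-- flushes exactly like a space) and extracts the words by index search and slicing
-- instead of A's per-element push/flush state machine (objective: alternative).

-- ===== PORT A =====
-- one character step of A's inner loop: state = (words, word_stack)
def pvCharStep (st : List String × List String) (character : String) :
    List String × List String :=
  if character == " " then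
    if st.2 ≠ [] then
      if st.2.length > 1 then (st.1 ++ [PySem.Str.join "" st.2], []) else (st.1, [])
    else st
  else (st.1, st.2 ++ [character])

-- A's end-of-line flush (the Python repeats this code after the inner loop)
def pvFlush (st : List String × List String) : List String × List String :=
  if st.2 ≠ [] then
    if st.2.length > 1 then (st.1 ++ [PySem.Str.join "" st.2], []) else (st.1, [])
  else st

def parse_words_by_line_py (solution : List (List String)) : List String :=
  (solution.foldl (fun st line => pvFlush (line.foldl pvCharStep st)) ([], [])).1

-- ===== PORT B =====
-- flat.index(" ", i) / the except-branch: the least absolute index ≥ i whose element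
-- equals " ", or n when there is none; exact port of list.index with a start argument
def pvNextSpace (flat : List String) (n i : Nat) : Nat :=
  match (flat.drop i).idxOf? " " with
  | some k => i + k
  | none => n

theorem pvNextSpace_ge (flat : List String) (n i : Nat) (h : i < n) :
    i ≤ pvNextSpace flat n i := by
  unfold pvNextSpace
  split
  · omega
  · omega

-- Source B's while loop; flat[i:j] (0 ≤ i ≤ j ≤ n) is exactly (flat.drop i).take (j - i)
def pvScanLoop (flat : List String) (n : Nat) (words : List String) (i : Nat) :
    List String :=
  if h : i < n then
    let j := pvNextSpace flat n i
    pvScanLoop flat n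
      (if j - i > 1 then words ++ [PySem.Str.join "" ((flat.drop i).take (j - i))]
       else words)
      (j + 1)
  else words
termination_by n - i
decreasing_by
  have := pvNextSpace_ge flat n i h
  omega

def parse_words_by_line_py_alt (solution : List (List String)) : List String :=
  let flat := solution.flatMap (fun line => line ++ [" "])
  pvScanLoop flat flat.length [] 0

-- ===== PRECONDITION & SPEC =====
def Spec_parse_words_by_line_py (solution : List (List String)) (out : List String) : Prop := out = parse_words_by_line_py_alt solution
instance (solution : List (List String)) (out : List String) : Decidable (Spec_parse_words_by_line_py solution out) := by unfold Spec_parse_words_by_line_py; infer_instance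

-- ===== CLAIM (what is proved, stated in full; the proofs are below) =====
def Claim_equal_parse_words_by_line_py : Prop := ∀ (solution : List (List String)), Dom_parse_words_by_line_py solution → Spec_parse_words_by_line_py solution (parse_words_by_line_py solution)

-- ===== LEMMAS AND PROOFS =====

-- proof-side reference function: the words of a flat list, cutting at the first space
def pvWords : List String → List String
  | [] => []
  | c :: r =>
    let j : Nat := match (c :: r).idxOf? " " with
      | some k => k
      | none => (c :: r).length
    (if j > 1 then [PySem.Str.join "" ((c :: r).take j)] else []) ++
      pvWords ((c :: r).drop (j + 1))
termination_by l => l.length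
decreasing_by
  simp only [List.length_drop, List.length_cons]
  omega

-- the per-line words both programs produce
def pvLineWords (line : List String) : List String := pvWords (line ++ [" "])

-- unfolding pvWords once when the first space is at index k
theorem pvWords_cons_some (c : String) (r : List String) (k : Nat)
    (hk : (c :: r).idxOf? " " = some k) :
    pvWords (c :: r) =
      (if k > 1 then [PySem.Str.join "" ((c :: r).take k)] else []) ++
        pvWords ((c :: r).drop (k + 1)) := by
  rw [pvWords, hk]

-- unfolding pvWords once when there is no space
theorem pvWords_cons_none (c : String) (r : List String)
    (hk : (c :: r).idxOf? " " = none) :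
    pvWords (c :: r) = if (c :: r).length > 1 then [PySem.Str.join "" (c :: r)] else [] := by
  rw [pvWords, hk]
  have hnil : (c :: r).drop ((c :: r).length + 1) = [] := List.drop_eq_nil_of_le (by simp)
  rw [List.take_length, hnil, pvWords, List.append_nil]

-- first space after a space-free prefix
theorem pvIdx_stack (stack rest : List String)
    (hs : ∀ x ∈ stack, (x == " ") = false) :
    (stack ++ " " :: rest).idxOf? " " = some stack.length := by
  induction stack with
  | nil => simp [List.idxOf?_cons]
  | cons a t ih =>
    have ha : ¬ a = " " := by simpa using hs a (by simp)
    simp [List.idxOf?_cons, ha, ih (fun x hx => hs x (by simp [hx]))]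

theorem pvTake_stack (stack rest : List String) :
    (stack ++ " " :: rest).take stack.length = stack := by
  exact List.take_left

theorem pvDrop_stack (stack rest : List String) :
    (stack ++ " " :: rest).drop (stack.length + 1) = rest := by
  have h : stack ++ " " :: rest = (stack ++ [" "]) ++ rest := by simp
  rw [h, show stack.length + 1 = (stack ++ [" "]).length by simp]
  exact List.drop_left

-- one cut of pvWords at a space following a space-free prefix
theorem pvWords_stack_cons (stack rest : List String)
    (hs : ∀ x ∈ stack, (x == " ") = false) :
    pvWords (stack ++ " " :: rest) =
      (if stack.length > 1 then [PySem.Str.join "" stack] else []) ++ pvWords rest := by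
  have hidx := pvIdx_stack stack rest hs
  cases hst : stack ++ " " :: rest with
  | nil => exact absurd hst (by simp)
  | cons c r =>
    rw [← hst]
    rw [hst] at hidx
    rw [hst, pvWords_cons_some c r stack.length hidx, ← hst, pvTake_stack, pvDrop_stack]

-- pvLineWords of a space-free stack (A's flush)
theorem pvLineWords_stack (stack : List String) (hs : ∀ x ∈ stack, (x == " ") = false) :
    pvLineWords stack =
      (if stack ≠ [] ∧ stack.length > 1 then [PySem.Str.join "" stack] else []) := by
  unfold pvLineWords
  rw [pvWords_stack_cons stack [] hs, pvWords, List.append_nil]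
  by_cases h1 : stack.length > 1
  · have h0 : stack ≠ [] := by intro h; subst h; simp at h1
    simp [h0, h1]
  · simp [h1]

-- splitting pvLineWords at a space following a maximal space-free run
theorem pvLineWords_split (stack rest : List String) (c : String)
    (hs : ∀ x ∈ stack, (x == " ") = false) (hc : (c == " ") = true) :
    pvLineWords (stack ++ c :: rest) = pvLineWords stack ++ pvLineWords rest := by
  have hcs : c = " " := by simpa using hc
  subst hcs
  unfold pvLineWords
  have h : (stack ++ " " :: rest) ++ [" "] = stack ++ " " :: (rest ++ [" "]) := by simp
  rw [h, pvWords_stack_cons stack (rest ++ [" "]) hs, pvWords_stack_cons stack [] hs,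
    pvWords, List.append_nil]

-- ===== A's loops compute flatMap pvLineWords =====

theorem pvInner (line : List String) (words stack : List String)
    (hs : ∀ x ∈ stack, (x == " ") = false) :
    pvFlush (line.foldl pvCharStep (words, stack)) =
      (words ++ pvLineWords (stack ++ line), []) := by
  induction line generalizing words stack with
  | nil =>
    rw [List.foldl_nil, List.append_nil, pvFlush, pvLineWords_stack stack hs]
    by_cases h0 : stack = []
    · simp [h0]
    · by_cases h1 : stack.length > 1
      · simp [h0, h1]
      · simp [h0, h1]
  | cons c rest ih =>
    by_cases hc : (c == " ") = true
    · rw [List.foldl_cons]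
      have hstep : pvCharStep (words, stack) c = ((words ++ pvLineWords stack), []) := by
        rw [pvCharStep, if_pos hc, pvLineWords_stack stack hs]
        by_cases h0 : stack = []
        · simp [h0]
        · by_cases h1 : stack.length > 1
          · simp [h0, h1]
          · simp [h0, h1]
      rw [hstep, ih _ _ (by intro x hx; cases hx), List.nil_append,
        pvLineWords_split stack rest c hs hc, List.append_assoc]
    · rw [List.foldl_cons]
      have hstep : pvCharStep (words, stack) c = (words, stack ++ [c]) := by
        rw [pvCharStep, if_neg (by simpa using hc)]
      rw [hstep, ih _ _ (by
        intro x hx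
        rcases List.mem_append.mp hx with h | h
        · exact hs x h
        · simp at h; subst h; simpa using hc)]
      rw [List.append_assoc]
      rfl

theorem pvOuter (solution : List (List String)) (words : List String) :
    (solution.foldl (fun st line => pvFlush (line.foldl pvCharStep st)) (words, [])).1 =
      words ++ solution.flatMap pvLineWords := by
  induction solution generalizing words with
  | nil => simp
  | cons line rest ih =>
    rw [List.foldl_cons, pvInner line words [] (by intro x hx; cases hx)]
    rw [ih]
    simp

-- ===== B's loop computes pvWords of the flattening =====

theorem pvScanLoop_step (flat : List String) (n : Nat) (words : List String) (i : Nat)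
    (h : i < n) :
    pvScanLoop flat n words i =
      pvScanLoop flat n
        (if pvNextSpace flat n i - i > 1
         then words ++ [PySem.Str.join "" ((flat.drop i).take (pvNextSpace flat n i - i))]
         else words)
        (pvNextSpace flat n i + 1) := by
  conv_lhs => rw [pvScanLoop]
  rw [dif_pos h]

theorem pvScan_eq (flat : List String) :
    ∀ (m i : Nat) (words : List String), flat.length - i ≤ m →
      pvScanLoop flat flat.length words i = words ++ pvWords (flat.drop i) := by
  intro m
  induction m with
  | zero =>
    intro i words hm
    have hge : ¬ i < flat.length := by omega
    have hnil : flat.drop i = [] := List.drop_eq_nil_of_le (by omega)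
    rw [pvScanLoop, dif_neg hge, hnil, pvWords, List.append_nil]
  | succ m ih =>
    intro i words hm
    by_cases h : i < flat.length
    · cases hk : (flat.drop i).idxOf? " " with
      | some k =>
        have hj : pvNextSpace flat flat.length i = i + k := by
          unfold pvNextSpace; rw [hk]
        obtain ⟨c, r, hd⟩ : ∃ c r, flat.drop i = c :: r := by
          cases hdr : flat.drop i with
          | nil => exact absurd (List.drop_eq_nil_iff.mp hdr) (by omega)
          | cons c r => exact ⟨c, r, rfl⟩
        have hk' : List.idxOf? " " (c :: r) = some k := by rw [← hd]; exact hk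
        have hik : i + k - i = k := by omega
        have hdd : flat.drop (i + k + 1) = (c :: r).drop (k + 1) := by
          rw [← hd, List.drop_drop]; congr 1
        rw [pvScanLoop_step flat flat.length words i h, hj, hik,
          ih (i + k + 1) _ (by omega), hdd, hd, pvWords_cons_some c r k hk']
        by_cases h1 : k > 1
        · simp [h1]
        · simp [h1]
      | none =>
        have hj : pvNextSpace flat flat.length i = flat.length := by
          unfold pvNextSpace; rw [hk]
        obtain ⟨c, r, hd⟩ : ∃ c r, flat.drop i = c :: r := by
          cases hdr : flat.drop i with
          | nil => exact absurd (List.drop_eq_nil_iff.mp hdr) (by omega)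
          | cons c r => exact ⟨c, r, rfl⟩
        have hk' : List.idxOf? " " (c :: r) = none := by rw [← hd]; exact hk
        have hlen : (c :: r).length = flat.length - i := by rw [← hd, List.length_drop]
        have hnil : flat.drop (flat.length + 1) = [] := List.drop_eq_nil_of_le (by omega)
        have htk : (flat.drop i).take (flat.length - i) = c :: r := by
          rw [hd, ← hlen, List.take_length]
        rw [pvScanLoop_step flat flat.length words i h, hj,
          ih (flat.length + 1) _ (by omega), hnil, htk, hd,
          pvWords_cons_none c r hk', hlen, pvWords, List.append_nil]
        by_cases h1 : flat.length - i > 1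
        · simp [h1]
        · simp [h1]
    · have hnil : flat.drop i = [] := List.drop_eq_nil_of_le (by omega)
      rw [pvScanLoop, dif_neg h, hnil, pvWords, List.append_nil]

-- cutting one sentinel-terminated line off the front of pvWords
theorem pvWords_line (line : List String) :
    ∀ (stack rest : List String), (∀ x ∈ stack, (x == " ") = false) →
      pvWords (stack ++ line ++ " " :: rest) =
        pvLineWords (stack ++ line) ++ pvWords rest := by
  induction line with
  | nil =>
    intro stack rest hs
    rw [List.append_nil, pvWords_stack_cons stack rest hs, pvLineWords_stack stack hs]
    by_cases h1 : stack.length > 1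
    · have h0 : stack ≠ [] := by intro h; subst h; simp at h1
      simp [h0, h1]
    · simp [h1]
  | cons c line' ih =>
    intro stack rest hs
    by_cases hc : (c == " ") = true
    · have hcs : c = " " := by simpa using hc
      subst hcs
      have h : stack ++ (" " :: line') ++ " " :: rest =
          stack ++ " " :: (line' ++ " " :: rest) := by simp
      have hih := ih [] rest (by intro x hx; cases hx)
      simp only [List.nil_append] at hih
      rw [h, pvWords_stack_cons stack _ hs, hih,
        pvLineWords_split stack line' " " hs (by simp), pvLineWords_stack stack hs]
      by_cases h1 : stack.length > 1
      · have h0 : stack ≠ [] := by intro h'; subst h'; simp at h1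
        simp [h0, h1]
      · simp [h1]
    · have h : stack ++ (c :: line') ++ " " :: rest =
          (stack ++ [c]) ++ line' ++ " " :: rest := by simp
      have h2 : stack ++ c :: line' = (stack ++ [c]) ++ line' := by simp
      rw [h, h2]
      exact ih (stack ++ [c]) rest (by
        intro x hx
        rcases List.mem_append.mp hx with hx' | hx'
        · exact hs x hx'
        · simp at hx'; subst hx'; simpa using hc)

theorem pvWords_flat (solution : List (List String)) :
    pvWords (solution.flatMap (fun line => line ++ [" "])) =
      solution.flatMap pvLineWords := by
  induction solution with
  | nil => rw [List.flatMap_nil, List.flatMap_nil, pvWords]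
  | cons line rest ih =>
    rw [List.flatMap_cons, List.flatMap_cons]
    have hW := pvWords_line line [] (rest.flatMap fun l => l ++ [" "])
      (by intro x hx; cases hx)
    simp only [List.nil_append] at hW
    have h : (line ++ [" "]) ++ rest.flatMap (fun l => l ++ [" "]) =
        line ++ " " :: rest.flatMap (fun l => l ++ [" "]) := by simp
    rw [h, hW, ih]

-- ===== VERDICT (by name: the statement is the Claim_ definition above) =====
theorem parse_words_by_line_py_spec : Claim_equal_parse_words_by_line_py := by
  intro solution _
  unfold Spec_parse_words_by_line_py
  simp only [parse_words_by_line_py, parse_words_by_line_py_alt]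
  rw [pvOuter,
    pvScan_eq (List.flatMap (fun line => line ++ [" "]) solution)
      (List.flatMap (fun line => line ++ [" "]) solution).length 0 [] (by omega),
    List.drop_zero, pvWords_flat]
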